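-- pv_equiv track=rewrite | github.com/Logomachine-edu/python_fullstack_class | module_2/lesson_10/src/solution_6.py | find_max_price
-- ===== SOURCE A (Python) =====
-- def find_max_price(data, i = 0):
--     max_price = 0
--     if len(data) == 0 :
--         return None
--     elif len(data) == 1:
--         max_price = data[0]
--         return max_price
--     else:
--         max_price = find_max_price(data[1:])
--         if data[0] > max_price:
--             max_price = data[0]
--             return max_price
--         else:
--             return max_price
-- ===== SOURCE B (Python) =====
-- def find_max_price(data, i = 0):
--     if len(data) == 0:
--         return None
--     best = data[0]
--     for x in data[1:]:
--         if x > best: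
--             best = x
--     return best
-- ===== Notes on version B (the rewrite author's own statement) =====
-- stated objective: faster
-- what changed: Replaces recursion over list slices (which copies the tail at every level) with a single iterative pass keeping a running best value.
import Mathlib
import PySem

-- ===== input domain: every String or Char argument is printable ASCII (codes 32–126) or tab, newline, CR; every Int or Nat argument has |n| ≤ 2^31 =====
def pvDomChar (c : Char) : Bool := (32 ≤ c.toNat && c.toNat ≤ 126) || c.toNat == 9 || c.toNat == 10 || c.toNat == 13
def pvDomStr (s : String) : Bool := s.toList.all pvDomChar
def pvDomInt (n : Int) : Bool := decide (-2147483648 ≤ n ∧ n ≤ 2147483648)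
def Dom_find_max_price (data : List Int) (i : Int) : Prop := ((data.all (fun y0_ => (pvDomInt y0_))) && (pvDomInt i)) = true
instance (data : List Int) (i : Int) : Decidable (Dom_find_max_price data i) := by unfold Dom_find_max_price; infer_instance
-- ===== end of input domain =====

-- B replaces A's recursion over list slices with a single iterative pass keeping a running best.

-- ===== PORT A =====
def find_max_price (data : List Int) (i : Int) : Option Int :=
  if _h0 : data.length = 0 then none
  else if _h1 : data.length = 1 then some (PySem.List.pyGetD data 0 0)
  else
    match find_max_price (PySem.List.slice data (some 1) none) 0 with
    | none => none  -- unreachable: the recursive call is on a nonempty list (Python never compares with None here)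
    | some m =>
      if PySem.List.pyGetD data 0 0 > m then some (PySem.List.pyGetD data 0 0) else some m
termination_by data.length
decreasing_by simp [PySem.List.slice_from_one]; omega

-- ===== PORT B =====
def find_max_price_alt (data : List Int) (i : Int) : Option Int :=
  match data with
  | [] => none
  | x :: xs => some (xs.foldl (fun best v => if v > best then v else best) x)

-- ===== PRECONDITION & SPEC =====
def Spec_find_max_price (data : List Int) (i : Int) (out : Option Int) : Prop := out = find_max_price_alt data i
instance (data : List Int) (i : Int) (out : Option Int) : Decidable (Spec_find_max_price data i out) := by unfold Spec_find_max_price; infer_instance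

-- ===== CLAIM (what is proved, stated in full; the proofs are below) =====
def Claim_equal_find_max_price : Prop := ∀ (data : List Int) (i : Int), Dom_find_max_price data i → Spec_find_max_price data i (find_max_price data i)

-- ===== LEMMAS AND PROOFS =====

theorem fmp_f_eq_max (xs : List Int) (a : Int) :
    xs.foldl (fun best v => if v > best then v else best) a = xs.foldl max a := by
  induction xs generalizing a with
  | nil => rfl
  | cons y ys ih =>
    simp only [List.foldl_cons, ih]
    congr 1
    rcases max_cases a y with ⟨h1, h2⟩ | ⟨h1, h2⟩ <;> omega

theorem fmp_max_foldl (ys : List Int) (a b : Int) :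
    max (ys.foldl max a) b = ys.foldl max (max a b) := by
  induction ys generalizing a with
  | nil => rfl
  | cons z zs ih =>
    simp only [List.foldl_cons, ih]
    congr 1
    rw [max_right_comm]

theorem fmp_cons (x : Int) (xs : List Int) (i : Int) :
    find_max_price (x :: xs) i = some (xs.foldl max x) := by
  induction xs generalizing x i with
  | nil =>
    simp [find_max_price, PySem.List.pyGetD_zero_cons]
  | cons y ys ih =>
    rw [find_max_price]
    simp only [List.length_cons, PySem.List.slice_from_one, List.tail_cons,
      PySem.List.pyGetD_zero_cons, ih]
    have hlen : ¬ (ys.length + 1 + 1 = 0) := by omega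
    have hlen1 : ¬ (ys.length + 1 + 1 = 1) := by omega
    rw [dif_neg hlen, dif_neg hlen1]
    split_ifs with h
    · have e : ys.foldl max (max x y) = x := by
        rw [max_comm x y, ← fmp_max_foldl]; omega
      rw [List.foldl_cons, e]
    · have e : ys.foldl max (max x y) = ys.foldl max y := by
        rw [max_comm x y, ← fmp_max_foldl]; omega
      rw [List.foldl_cons, e]

-- ===== VERDICT (by name: the statement is the Claim_ definition above) =====
theorem find_max_price_spec : Claim_equal_find_max_price := by
  intro data i _
  unfold Spec_find_max_price
  cases data with
  | nil => simp [find_max_price, find_max_price_alt]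
  | cons x xs => rw [fmp_cons, find_max_price_alt, fmp_f_eq_max]
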